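-- pv_equiv track=rewrite | github.com/nicolas0p/ComputerSecurity | playfair.py | _find_next_pair
-- ===== SOURCE A (Python) =====
-- removed_letter = 'y'
--
-- def _find_next_pair(text, leftPosition, rightPosition = 0):
--     if rightPosition == 0:
--         rightPosition = leftPosition + 1
--     """Finds the next available pair of characters in 'text' starting at 'leftPosition'
--     @param text string where the pair will be found
--     @param leftPosition the first position the left character could be positioned
--     @param rightPosition the first position the right character could be positioned
--     """
--     if rightPosition == len(text):
--         text += "z"
--     if text[leftPosition] == removed_letter:
--         return _find_next_pair(text, leftPosition + 1)
--     if text[rightPosition] == removed_letter: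
--         return _find_next_pair(text, leftPosition, rightPosition + 1)
--     return text[leftPosition], text[rightPosition], leftPosition, rightPosition
-- ===== SOURCE B (Python) =====
-- removed_letter = 'y'
--
-- def _find_next_pair(text, leftPosition, rightPosition = 0):
--     """Iterative closed-form version: scan over 'text' viewed as padded with 'z'
--     beyond its end, instead of recursing with a mutated string."""
--     def ext(i):
--         return text[i] if i < len(text) else 'z'
--     l = leftPosition
--     while ext(l) == removed_letter:
--         l += 1
--     r = rightPosition if (rightPosition != 0 and l == leftPosition) else l + 1
--     while ext(r) == removed_letter:
--         r += 1
--     return ext(l), ext(r), l, r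
-- ===== Notes on version B (the rewrite author's own statement) =====
-- stated objective: simpler
-- what changed: A's recursion that mutates the string (appending 'z' pads) and re-enters itself with a rightPosition=0 sentinel is replaced by two iterative cursor scans over the text viewed as conceptually padded with 'z' beyond its end, with the right cursor's default resolved once by a single condition.
-- outside the precondition, e.g. on _find_next_pair('', -1, 0): A returns ('z', 'z', -1, 0), B raises IndexError; on _find_next_pair('xy', -2, 1): A returns ('z', 'x', -1, 0), B returns ('x', 'z', -2, 2); on _find_next_pair('xy', 0, -1): A returns ('x', 'z', 0, 2), B returns ('x', 'x', 0, 0)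
import Mathlib
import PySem

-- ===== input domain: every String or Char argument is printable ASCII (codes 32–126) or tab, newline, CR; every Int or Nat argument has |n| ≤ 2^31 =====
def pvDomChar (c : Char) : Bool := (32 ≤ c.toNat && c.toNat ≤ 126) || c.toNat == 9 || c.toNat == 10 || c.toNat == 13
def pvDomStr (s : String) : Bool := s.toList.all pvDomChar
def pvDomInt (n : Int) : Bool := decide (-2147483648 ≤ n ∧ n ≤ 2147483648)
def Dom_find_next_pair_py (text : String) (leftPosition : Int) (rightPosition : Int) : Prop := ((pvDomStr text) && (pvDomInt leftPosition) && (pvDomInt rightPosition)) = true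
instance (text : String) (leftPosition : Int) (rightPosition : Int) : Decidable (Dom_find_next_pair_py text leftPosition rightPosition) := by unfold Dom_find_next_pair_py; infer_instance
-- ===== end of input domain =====

-- B replaces A's recursion-with-string-mutation by two iterative scans over the text
-- viewed as padded with 'z' beyond its end (objective: simpler; equivalence on Pre_ below).

-- ===== PORT A =====
-- Literal port of A's recursion; a Nat fuel only makes the recursion well-founded
-- (4*len+8 always suffices on Pre_ inputs); pyGet? none = IndexError, excluded by Pre_.
def goA_find_next_pair (fuel : Nat) (t : List Char) (l r : Int) :
    String × String × Int × Int :=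
  match fuel with
  | 0 => ("", "", 0, 0)
  | f + 1 =>
    -- if rightPosition == 0: rightPosition = leftPosition + 1
    let r := if r = 0 then l + 1 else r
    -- if rightPosition == len(text): text += "z"
    let t := if r = (t.length : Int) then t ++ ['z'] else t
    match PySem.List.pyGet? t l with
    | none => ("", "", 0, 0)                    -- IndexError (outside Pre_)
    | some cl =>
      if cl = 'y' then goA_find_next_pair f t (l + 1) 0
      else
        match PySem.List.pyGet? t r with
        | none => ("", "", 0, 0)                -- IndexError (outside Pre_)
        | some cr =>
          if cr = 'y' then goA_find_next_pair f t l (r + 1)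
          else (String.ofList [cl], String.ofList [cr], l, r)

def find_next_pair_py (text : String) (leftPosition : Int) (rightPosition : Int) :
    String × String × Int × Int :=
  goA_find_next_pair (4 * text.toList.length + 8) text.toList leftPosition rightPosition

-- ===== PORT B =====
-- ext(i) = text[i] if i < len(text) else 'z'   (the '?' default is Python's IndexError,
-- reached only outside Pre_)
def extB_find_next_pair (t : List Char) (i : Int) : Char :=
  if i < (t.length : Int) then (PySem.List.pyGet? t i).getD '?' else 'z'

-- while ext(cursor) == 'y': cursor += 1
def scanB_find_next_pair (t : List Char) (i : Int) : Int :=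
  if h : extB_find_next_pair t i = 'y' then scanB_find_next_pair t (i + 1) else i
termination_by ((t.length : Int) - i).toNat
decreasing_by
  have hi : i < (t.length : Int) := by
    by_contra hc
    simp [extB_find_next_pair, hc] at h
  omega

def find_next_pair_py_alt (text : String) (leftPosition : Int) (rightPosition : Int) :
    String × String × Int × Int :=
  let t := text.toList
  let l := scanB_find_next_pair t leftPosition
  let r0 := if rightPosition ≠ 0 ∧ l = leftPosition then rightPosition else l + 1
  let r := scanB_find_next_pair t r0
  (String.ofList [extB_find_next_pair t l], String.ofList [extB_find_next_pair t r], l, r)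

-- ===== PRECONDITION & SPEC =====
-- Pre_ excludes (i) inputs where A raises IndexError or diverges (RecursionError), and
-- (ii) inputs where A returns a value only via Python negative-index wraparound
-- interacting with A's in-recursion "z"-padding (which shifts what a negative index
-- denotes) or with its rightPosition==0 sentinel reset — accidents of A's implementation
-- on which A and B legitimately diverge (see cites).  Negative-index inputs on which
-- that interaction provably cannot occur ARE admitted (disjuncts 2 and 3 and the
-- pyRange.any scan-stop side conditions).
def Pre_find_next_pair_py (text : String) (leftPosition : Int) (rightPosition : Int) : Prop :=
  let t := text.toList
  let n : Int := (t.length : Int)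
  let r0 : Int := if rightPosition = 0 then leftPosition + 1 else rightPosition
  (0 ≤ leftPosition ∧ leftPosition < n ∧
    PySem.List.pyGet? t leftPosition = some 'y' ∧
    (leftPosition = n - 1 → rightPosition = 0 ∨ rightPosition = n))
  ∨
  (-n ≤ leftPosition ∧ leftPosition < 0 ∧
    PySem.List.pyGet? t leftPosition = some 'y' ∧ rightPosition ≠ n ∧
    ((PySem.List.pyGet? t (-1)).getD 'y' ≠ 'y' ∨
     ¬ ((PySem.List.pyRange leftPosition 0).any
          (fun j => decide ((PySem.List.pyGet? t j).getD 'y' ≠ 'y'))) = true ∨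
     ((PySem.List.pyRange leftPosition 0).any
          (fun j => decide ((PySem.List.pyGet? t j).getD 'y' ≠ 'y') &&
            (PySem.List.pyRange (j + 1) 0).any
              (fun k => decide ((PySem.List.pyGet? t k).getD 'y' ≠ 'y')))) = true))
  ∨
  (-n ≤ leftPosition ∧ leftPosition < n ∧
    (PySem.List.pyGet? t leftPosition).getD 'y' ≠ 'y' ∧
    ((0 ≤ r0 ∧ r0 ≤ n ∧
       (0 ≤ leftPosition ∨
        (PySem.List.pyRange r0 n).any
          (fun j => decide ((PySem.List.pyGet? t j).getD 'y' ≠ 'y')))) ∨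
     (-n ≤ r0 ∧ r0 < 0 ∧
       (PySem.List.pyRange r0 0).any
         (fun j => decide ((PySem.List.pyGet? t j).getD 'y' ≠ 'y')))))
  ∨
  (1 ≤ n ∧ leftPosition = n ∧ rightPosition = n)

instance (text : String) (leftPosition : Int) (rightPosition : Int) : Decidable (Pre_find_next_pair_py text leftPosition rightPosition) := by unfold Pre_find_next_pair_py; infer_instance

def pvWitness_find_next_pair_py : String × Int × Int := ("ab", 0, 0)

def Spec_find_next_pair_py (text : String) (leftPosition : Int) (rightPosition : Int) (out : String × String × Int × Int) : Prop := out = find_next_pair_py_alt text leftPosition rightPosition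
instance (text : String) (leftPosition : Int) (rightPosition : Int) (out : String × String × Int × Int) : Decidable (Spec_find_next_pair_py text leftPosition rightPosition out) := by unfold Spec_find_next_pair_py; infer_instance

-- ===== CLAIM (what is proved, stated in full; the proofs are below) =====
def Claim_equal_find_next_pair_py : Prop := ∀ (text : String) (leftPosition : Int) (rightPosition : Int), Dom_find_next_pair_py text leftPosition rightPosition → Pre_find_next_pair_py text leftPosition rightPosition → Spec_find_next_pair_py text leftPosition rightPosition (find_next_pair_py text leftPosition rightPosition)

-- ===== LEMMAS AND PROOFS =====

-- pyGet? is some for indices in [-len, len)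
lemma pv_pyGet_some {t : List Char} {i : Int} (h0 : -(t.length : Int) ≤ i)
    (h1 : i < (t.length : Int)) : ∃ c, PySem.List.pyGet? t i = some c := by
  rcases Option.ne_none_iff_exists'.1 (by
    rw [Ne, PySem.List.pyGet?_eq_none_iff]
    exact fun hn => hn ⟨h0, h1⟩) with ⟨c, hc⟩
  exact ⟨c, hc⟩

-- on [-len, len), ext reads pyGet?
lemma pv_ext_eq_pyGet {t : List Char} {i : Int} (h0 : -(t.length : Int) ≤ i)
    (h1 : i < (t.length : Int)) :
    PySem.List.pyGet? t i = some (extB_find_next_pair t i) := by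
  rcases pv_pyGet_some h0 h1 with ⟨c, hc⟩
  simp [extB_find_next_pair, h1, hc]

lemma pv_ext_ge (t : List Char) {i : Int} (h : (t.length : Int) ≤ i) :
    extB_find_next_pair t i = 'z' := by
  simp [extB_find_next_pair]
  omega

-- Python's negative-index wraparound: ext at i < 0 reads position i + len
lemma pv_ext_wrap {t : List Char} {i : Int} (h0 : -(t.length : Int) ≤ i) (h1 : i < 0) :
    extB_find_next_pair t i = extB_find_next_pair t (i + (t.length : Int)) := by
  rw [extB_find_next_pair, extB_find_next_pair, if_pos (by omega), if_pos (by omega),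
    PySem.List.pyGet?_neg t h1 h0,
    PySem.List.pyGet?_eq_some_getElem _ (by omega) (by omega)]
  have hidx : t.length - (-i).toNat = (i + (t.length : Int)).toNat := by omega
  rw [hidx, List.getElem?_eq_getElem (by omega)]

-- appending a 'z' does not change ext at nonnegative indices
lemma pv_ext_append {t : List Char} {i : Int} (h0 : 0 ≤ i) :
    extB_find_next_pair (t ++ ['z']) i = extB_find_next_pair t i := by
  by_cases h1 : i < (t.length : Int)
  · rw [extB_find_next_pair, extB_find_next_pair]
    have hl : i < ((t ++ ['z']).length : Int) := by simp; omega
    rw [if_pos hl, if_pos h1,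
      PySem.List.pyGet?_eq_some_getElem _ h0 hl,
      PySem.List.pyGet?_eq_some_getElem _ h0 h1]
    simp [List.getElem_append_left (by omega : i.toNat < t.length)]
  · by_cases h2 : i = (t.length : Int)
    · subst h2
      rw [pv_ext_ge t (le_refl _), extB_find_next_pair]
      have hl : (t.length : Int) < ((t ++ ['z']).length : Int) := by simp
      rw [if_pos hl, PySem.List.pyGet?_eq_some_getElem _ (by positivity) hl]
      simp
    · rw [pv_ext_ge t (by omega), pv_ext_ge (t ++ ['z']) (by simp; omega)]

lemma pv_pyGet_append {t : List Char} {i : Int} (h0 : 0 ≤ i) (h1 : i < (t.length : Int)) :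
    PySem.List.pyGet? (t ++ ['z']) i = PySem.List.pyGet? t i := by
  rw [PySem.List.pyGet?_eq_some_getElem _ h0 h1,
    PySem.List.pyGet?_eq_some_getElem _ h0 (by simp; omega)]
  simp [List.getElem_append_left (by omega : i.toNat < t.length)]

lemma pv_getD_ne {t : List Char} {i : Int}
    (h : (PySem.List.pyGet? t i).getD 'y' ≠ 'y') :
    ∃ c, PySem.List.pyGet? t i = some c ∧ c ≠ 'y' := by
  cases hq : PySem.List.pyGet? t i with
  | none => rw [hq] at h; simp at h
  | some c => rw [hq] at h; exact ⟨c, rfl, by simpa using h⟩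

lemma pv_some_bounds {t : List Char} {i : Int} {c : Char}
    (h : PySem.List.pyGet? t i = some c) :
    -(t.length : Int) ≤ i ∧ i < (t.length : Int) := by
  by_contra hc
  rw [(PySem.List.pyGet?_eq_none_iff t i).2 (fun hr => hc ⟨hr.1, hr.2⟩)] at h
  simp at h

lemma pv_scan_stop {t : List Char} {i : Int} (h : extB_find_next_pair t i ≠ 'y') :
    scanB_find_next_pair t i = i := by
  rw [scanB_find_next_pair, dif_neg h]

lemma pv_scan_step {t : List Char} {i : Int} (h : extB_find_next_pair t i = 'y') :
    scanB_find_next_pair t i = scanB_find_next_pair t (i + 1) := by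
  rw [scanB_find_next_pair, dif_pos h]

lemma pv_scan_ge (t : List Char) (i : Int) : i ≤ scanB_find_next_pair t i := by
  induction i using scanB_find_next_pair.induct t with
  | case1 i h ih => rw [pv_scan_step h]; omega
  | case2 i h => rw [pv_scan_stop h]

lemma pv_scan_append {t : List Char} {i : Int} (h0 : 0 ≤ i) :
    scanB_find_next_pair (t ++ ['z']) i = scanB_find_next_pair t i := by
  induction i using scanB_find_next_pair.induct t with
  | case1 i h ih =>
    rw [pv_scan_step h, pv_scan_step (by rw [pv_ext_append h0]; exact h)]
    exact ih (by omega)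
  | case2 i h =>
    rw [pv_scan_stop h, pv_scan_stop (by rw [pv_ext_append h0]; exact h)]

lemma pv_scan_lt {t : List Char} {i b : Int}
    (h : ∃ j, i ≤ j ∧ j < b ∧ extB_find_next_pair t j ≠ 'y') :
    scanB_find_next_pair t i < b := by
  induction i using scanB_find_next_pair.induct t with
  | case1 i hy ih =>
    rcases h with ⟨j, hij, hj0, hjy⟩
    rw [pv_scan_step hy]
    refine ih ⟨j, ?_, hj0, hjy⟩
    rcases eq_or_lt_of_le hij with rfl | hlt
    · exact absurd hy hjy
    · omega
  | case2 i hy =>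
    rcases h with ⟨j, hij, hj0, _⟩
    rw [pv_scan_stop hy]
    omega

-- convert the closed-form pyRange.any condition of Pre_ into a witness for pv_scan_lt
lemma pv_any_ex {t : List Char} {a b : Int}
    (h : ((PySem.List.pyRange a b).any
      (fun j => decide ((PySem.List.pyGet? t j).getD 'y' ≠ 'y'))) = true) :
    ∃ j, a ≤ j ∧ j < b ∧ extB_find_next_pair t j ≠ 'y' := by
  rcases List.any_eq_true.1 h with ⟨j, hjmem, hjp⟩
  have hjr := PySem.List.mem_pyRange_one.1 hjmem
  rcases pv_getD_ne (of_decide_eq_true hjp) with ⟨c, hc, hcy⟩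
  have hb := pv_some_bounds hc
  have he := pv_ext_eq_pyGet hb.1 hb.2
  rw [hc] at he
  exact ⟨j, hjr.1, hjr.2, by rw [← Option.some.inj he]; exact hcy⟩

-- the right-scan phase of A equals B's scan
lemma pv_right (fuel : Nat) (t : List Char) (l r : Int) (cl : Char)
    (hl0 : -(t.length : Int) ≤ l) (hl1 : l < (t.length : Int))
    (hcl : PySem.List.pyGet? t l = some cl) (hcly : cl ≠ 'y')
    (hr : (1 ≤ r ∧ r ≤ (t.length : Int) ∧
             (0 ≤ l ∨ scanB_find_next_pair t r < (t.length : Int))) ∨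
          (-(t.length : Int) ≤ r ∧ r < 0 ∧ scanB_find_next_pair t r < 0))
    (hfuel : ((t.length : Int) + 1 - r).toNat < fuel) :
    goA_find_next_pair fuel t l r =
      (String.ofList [cl], String.ofList [extB_find_next_pair t (scanB_find_next_pair t r)],
        l, scanB_find_next_pair t r) := by
  induction fuel generalizing r with
  | zero => omega
  | succ f ih =>
    have hr0 : ¬ (r = 0) := by rcases hr with ⟨h1, _⟩ | ⟨_, h1, _⟩ <;> omega
    simp only [goA_find_next_pair, if_neg hr0]
    by_cases hrn : r = (t.length : Int)
    · -- padding step: text += 'z', then both reads succeed and the pair is returned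
      have hscann : scanB_find_next_pair t r = r :=
        pv_scan_stop (by rw [pv_ext_ge t (le_of_eq hrn.symm)]; decide)
      have hl0' : 0 ≤ l := by
        rcases hr with ⟨_, _, hs | hs⟩ | ⟨_, h1, hs⟩
        · exact hs
        · rw [hscann] at hs; omega
        · rw [hscann] at hs; omega
      rw [if_pos hrn, pv_pyGet_append hl0' hl1, hcl]
      dsimp only
      rw [if_neg hcly]
      have hz : PySem.List.pyGet? (t ++ ['z']) r = some 'z' := by
        rw [hrn]
        exact_mod_cast PySem.List.pyGet?_append_length t [] 'z'
      rw [hz]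
      dsimp only
      rw [if_neg (by decide : ¬ ('z' = 'y'))]
      have hstop : scanB_find_next_pair t r = r :=
        pv_scan_stop (by rw [pv_ext_ge t (le_of_eq hrn.symm)]; decide)
      rw [hstop, pv_ext_ge t (le_of_eq hrn.symm)]
    · rw [if_neg hrn, hcl]
      dsimp only
      rw [if_neg hcly]
      have hrb : -(t.length : Int) ≤ r ∧ r < (t.length : Int) := by
        rcases hr with ⟨h1, h2⟩ | ⟨h1, h2, _⟩
        · constructor <;> omega
        · constructor <;> omega
      have hext := pv_ext_eq_pyGet hrb.1 hrb.2
      rw [hext]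
      dsimp only
      by_cases hcy : extB_find_next_pair t r = 'y'
      · rw [if_pos hcy, pv_scan_step hcy]
        refine ih (r + 1) ?_ (by omega)
        rcases hr with ⟨h1, h2, h3⟩ | ⟨h1, h2, hs⟩
        · refine Or.inl ⟨by omega, by omega, ?_⟩
          rcases h3 with h3 | h3
          · exact Or.inl h3
          · exact Or.inr (by rw [← pv_scan_step hcy]; exact h3)
        · refine Or.inr ⟨by omega, ?_, by rw [← pv_scan_step hcy]; exact hs⟩
          rcases lt_or_eq_of_le (by omega : r + 1 ≤ 0) with h | h
          · exact h
          · exfalso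
            rw [pv_scan_step hcy, h] at hs
            have := pv_scan_ge t 0
            omega
      · rw [if_neg hcy, pv_scan_stop hcy]

-- a call with rightPosition=0 is a call with rightPosition=leftPosition+1
lemma pv_goA_default (f : Nat) (t : List Char) (l : Int) (h : l + 1 ≠ 0) :
    goA_find_next_pair (f + 1) t l 0 = goA_find_next_pair (f + 1) t l (l + 1) := by
  simp only [goA_find_next_pair, if_neg h, if_true]

-- the left-skip phase of A (default rightPosition) equals B's two scans
lemma pv_left (fuel : Nat) (t : List Char) (l : Int)
    (hl0 : 0 ≤ l) (hl1 : l < (t.length : Int))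
    (hfuel : 2 * ((t.length : Int) - l).toNat + 4 ≤ fuel) :
    goA_find_next_pair fuel t l 0 =
      (String.ofList [extB_find_next_pair t (scanB_find_next_pair t l)],
       String.ofList [extB_find_next_pair t (scanB_find_next_pair t (scanB_find_next_pair t l + 1))],
       scanB_find_next_pair t l,
       scanB_find_next_pair t (scanB_find_next_pair t l + 1)) := by
  induction fuel generalizing l with
  | zero => omega
  | succ f ih =>
    have hl1' : l + 1 ≠ 0 := by omega
    rw [pv_goA_default f t l hl1']
    rcases pv_pyGet_some (t := t) (i := l) (by omega) hl1 with ⟨cl, hcl⟩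
    have hclx : extB_find_next_pair t l = cl := by
      have h := pv_ext_eq_pyGet (t := t) (i := l) (by omega) hl1
      rw [hcl] at h
      exact (Option.some.inj h).symm
    by_cases hcy : cl = 'y'
    · -- left skip: text[leftPosition] == 'y'
      have hscl : scanB_find_next_pair t l = scanB_find_next_pair t (l + 1) :=
        pv_scan_step (by rw [hclx]; exact hcy)
      simp only [goA_find_next_pair, if_neg hl1']
      by_cases hpad : l + 1 = (t.length : Int)
      · -- the skip happens at the very end: padding, then two more concrete steps
        rw [if_pos hpad, pv_pyGet_append hl0 hl1, hcl]
        dsimp only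
        rw [if_pos hcy]
        obtain ⟨f', rfl⟩ : ∃ f', f = f' + 1 := ⟨f - 1, by omega⟩
        rw [pv_goA_default f' (t ++ ['z']) (l + 1) (by omega)]
        simp only [goA_find_next_pair, if_neg (show ¬(l + 1 + 1 = 0) by omega)]
        have hpad2 : l + 1 + 1 = ((t ++ ['z']).length : Int) := by simp; omega
        rw [if_pos hpad2]
        have h1 : PySem.List.pyGet? ((t ++ ['z']) ++ ['z']) (l + 1) = some 'z' := by
          have he : (t ++ ['z']) ++ ['z'] = t ++ ('z' :: ['z']) := by simp
          rw [he, hpad]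
          exact_mod_cast PySem.List.pyGet?_append_length t ['z'] 'z'
        rw [h1]
        dsimp only
        rw [if_neg (by decide : ¬ ('z' = 'y'))]
        have h2 : PySem.List.pyGet? ((t ++ ['z']) ++ ['z']) (l + 1 + 1) = some 'z' := by
          rw [hpad2]
          exact_mod_cast PySem.List.pyGet?_append_length (t ++ ['z']) [] 'z'
        rw [h2]
        dsimp only
        rw [if_neg (by decide : ¬ ('z' = 'y'))]
        have hs1 : scanB_find_next_pair t l = l + 1 := by
          rw [hscl]
          exact pv_scan_stop (by rw [pv_ext_ge t (by omega)]; decide)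
        have hs2 : scanB_find_next_pair t (l + 1 + 1) = l + 1 + 1 :=
          pv_scan_stop (by rw [pv_ext_ge t (by omega)]; decide)
        rw [hs1, hs2, pv_ext_ge t (le_of_eq hpad.symm), pv_ext_ge t (by omega)]
      · -- ordinary skip: recurse on leftPosition + 1
        rw [if_neg hpad, hcl]
        dsimp only
        rw [if_pos hcy, hscl]
        exact ih (l + 1) (by omega) (by omega) (by omega)
    · -- no left skip: the right-scan phase takes over
      have hstop : scanB_find_next_pair t l = l := pv_scan_stop (by rw [hclx]; exact hcy)
      rw [pv_right (f + 1) t l (l + 1) cl (by omega) hl1 hcl hcy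
        (Or.inl ⟨by omega, by omega, Or.inl hl0⟩) (by omega), hstop, hclx]

-- the left-skip chain entered at a negative position (wraparound reads, no padding
-- until the cursor reaches the nonnegative range)
lemma pv_leftNeg (fuel : Nat) (t : List Char) (l : Int)
    (hl0 : -(t.length : Int) ≤ l) (hl1 : l < 0)
    (hsafe : extB_find_next_pair t (-1) ≠ 'y' ∨
      (∀ j, l ≤ j → j < 0 → extB_find_next_pair t j = 'y') ∨
      (∃ j k, l ≤ j ∧ j < k ∧ k < 0 ∧
        extB_find_next_pair t j ≠ 'y' ∧ extB_find_next_pair t k ≠ 'y'))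
    (hfuel : (0 - l).toNat + 2 * t.length + 5 ≤ fuel) :
    goA_find_next_pair fuel t l 0 =
      (String.ofList [extB_find_next_pair t (scanB_find_next_pair t l)],
       String.ofList [extB_find_next_pair t (scanB_find_next_pair t (scanB_find_next_pair t l + 1))],
       scanB_find_next_pair t l,
       scanB_find_next_pair t (scanB_find_next_pair t l + 1)) := by
  induction fuel generalizing l with
  | zero => omega
  | succ f ih =>
    have hn1 : (1:Int) ≤ (t.length : Int) := by omega
    rcases pv_pyGet_some (t := t) (i := l) hl0 (by omega) with ⟨cl, hcl⟩
    have hclx : extB_find_next_pair t l = cl := by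
      have h := pv_ext_eq_pyGet (t := t) (i := l) hl0 (by omega)
      rw [hcl] at h
      exact (Option.some.inj h).symm
    by_cases hcy : cl = 'y'
    · -- skip: move the left cursor up by one
      have hscl : scanB_find_next_pair t l = scanB_find_next_pair t (l + 1) :=
        pv_scan_step (by rw [hclx]; exact hcy)
      simp only [goA_find_next_pair, if_true]
      rw [if_neg (show ¬ (l + 1 = (t.length : Int)) by omega), hcl]
      dsimp only
      rw [if_pos hcy, hscl]
      rcases eq_or_lt_of_le (show l + 1 ≤ 0 by omega) with hz | hneg
      · rw [hz]
        exact pv_left f t 0 (le_refl 0) (by omega) (by omega)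
      · refine ih (l + 1) (by omega) (by omega) ?_ (by omega)
        rcases hsafe with h | h | ⟨j, k, hj, hjk, hk, hjy, hky⟩
        · exact Or.inl h
        · exact Or.inr (Or.inl (fun j hj1 hj2 => h j (by omega) hj2))
        · refine Or.inr (Or.inr ⟨j, k, ?_, hjk, hk, hjy, hky⟩)
          rcases eq_or_lt_of_le hj with rfl | h'
          · exact absurd (by rw [hclx]; exact hcy) hjy
          · omega
    · -- the left cursor stops here (still negative)
      have hstop : scanB_find_next_pair t l = l :=
        pv_scan_stop (by rw [hclx]; exact hcy)
      rcases eq_or_lt_of_le (show l + 1 ≤ 0 by omega) with hz | hneg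
      · -- l = -1: the right cursor starts at 0
        have hlm : l = -1 := by omega
        subst hlm
        have hm1 : extB_find_next_pair t (-1) ≠ 'y' := by
          rcases hsafe with h | h | ⟨j, k, hj, hjk, hk, _, _⟩
          · exact h
          · exact absurd (h (-1) (le_refl _) (by norm_num)) (by rw [hclx]; exact hcy)
          · omega
        rcases pv_pyGet_some (t := t) (i := 0) (by omega) (by omega) with ⟨c0, hc0⟩
        have hext0 : extB_find_next_pair t 0 = c0 := by
          have h := pv_ext_eq_pyGet (t := t) (i := 0) (by omega) (by omega)
          rw [hc0] at h
          exact (Option.some.inj h).symm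
        simp only [goA_find_next_pair, if_true]
        rw [if_neg (show ¬ (-1 + 1 : Int) = (t.length : Int) by omega), hcl]
        dsimp only
        rw [if_neg hcy]
        norm_num
        rw [hc0]
        dsimp only
        rw [hstop]
        norm_num
        by_cases hc0y : c0 = 'y'
        · rw [if_pos hc0y]
          have hstep0 : scanB_find_next_pair t 0 = scanB_find_next_pair t 1 := by
            have h : extB_find_next_pair t 0 = 'y' := by rw [hext0]; exact hc0y
            simpa using pv_scan_step h
          have hscan1 : scanB_find_next_pair t 1 < (t.length : Int) := by
            rcases eq_or_lt_of_le hn1 with h1' | h1'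
            · exfalso
              apply hm1
              rw [pv_ext_wrap (by omega) (by omega)]
              have h0' : (-1 : Int) + (t.length : Int) = 0 := by omega
              rw [h0', hext0]
              exact hc0y
            · refine pv_scan_lt ⟨(t.length : Int) - 1, by omega, by omega, ?_⟩
              have hw : extB_find_next_pair t (-1) =
                  extB_find_next_pair t ((t.length : Int) - 1) := by
                rw [pv_ext_wrap (show -(t.length : Int) ≤ -1 by omega) (by norm_num)]
                ring_nf
              rw [← hw]
              exact hm1
          rw [pv_right f t (-1) 1 cl (by omega) (by omega) hcl hcy
            (Or.inl ⟨le_refl _, by omega, Or.inr hscan1⟩) (by omega), hclx, hstep0]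
        · rw [if_neg hc0y]
          have h00 : scanB_find_next_pair t 0 = 0 :=
            pv_scan_stop (by rw [hext0]; exact hc0y)
          rw [h00, hext0, hclx]
      · -- l < -1: the right cursor starts negative and its scan stops before 0
        have hscan : scanB_find_next_pair t (l + 1) < 0 := by
          refine pv_scan_lt ?_
          rcases hsafe with h | h | ⟨j, k, hj, hjk, hk, hjy, hky⟩
          · exact ⟨-1, by omega, by omega, h⟩
          · exact absurd (h l (le_refl l) hl1) (by rw [hclx]; exact hcy)
          · rcases eq_or_lt_of_le hj with rfl | h'
            · exact ⟨k, by omega, hk, hky⟩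
            · exact ⟨j, by omega, by omega, hjy⟩
        obtain ⟨f', rfl⟩ : ∃ f', f = f' + 1 := ⟨f - 1, by omega⟩
        rw [pv_goA_default (f' + 1) t l (by omega),
          pv_right (f' + 1 + 1) t l (l + 1) cl hl0 (by omega) hcl hcy
            (Or.inr ⟨by omega, by omega, hscan⟩) (by omega), hstop, hclx]

-- ===== VERDICT (by name: the statement is the Claim_ definition above) =====
theorem find_next_pair_py_spec : Claim_equal_find_next_pair_py := by
  intro text lp rp _ hpre
  show find_next_pair_py text lp rp = find_next_pair_py_alt text lp rp
  unfold Pre_find_next_pair_py at hpre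
  simp only [find_next_pair_py, find_next_pair_py_alt]
  set t := text.toList with ht
  obtain ⟨FF, hFF⟩ : ∃ FF, 4 * t.length + 8 = FF + 1 := ⟨4 * t.length + 7, rfl⟩
  rw [hFF]
  rcases hpre with ⟨h0, h1, hy, himp⟩ | ⟨h0, h1, hy, hrn, hsafe'⟩ | ⟨h0, h1, hly, hRcase⟩ |
    ⟨hn1, hlp, hrp⟩
  · -- text[leftPosition] == 'y': A left-skips; B's left scan moves
    have hexty : extB_find_next_pair t lp = 'y' := by
      have h := pv_ext_eq_pyGet (t := t) (i := lp) (by omega) h1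
      rw [hy] at h
      exact (Option.some.inj h).symm
    have hstep : scanB_find_next_pair t lp = scanB_find_next_pair t (lp + 1) :=
      pv_scan_step hexty
    have hgt : lp < scanB_find_next_pair t lp := by
      have := pv_scan_ge t (lp + 1)
      omega
    rw [if_neg (show ¬ (rp ≠ 0 ∧ scanB_find_next_pair t lp = lp) from
      fun hand => absurd hand.2 (by omega))]
    rcases eq_or_ne rp 0 with hrp | hrp
    · subst hrp
      rw [pv_left (FF + 1) t lp h0 h1 (by omega)]
    · rcases eq_or_ne rp (t.length : Int) with hrn | hrn
      · -- explicit rightPosition == len(text): the padding happens before the skip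
        simp only [goA_find_next_pair, if_neg hrp]
        rw [if_pos hrn, pv_pyGet_append h0 h1, hy]
        dsimp only
        rw [if_pos rfl]
        have hlen : (t ++ ['z']).length = t.length + 1 := by simp
        rw [pv_left FF (t ++ ['z']) (lp + 1) (by omega) (by rw [hlen]; push_cast; omega)
          (by rw [hlen]; omega)]
        have hge : 0 ≤ scanB_find_next_pair t (lp + 1) :=
          le_trans (by omega) (pv_scan_ge t (lp + 1))
        have hge2 : 0 ≤ scanB_find_next_pair t (scanB_find_next_pair t (lp + 1) + 1) :=
          le_trans (by omega) (pv_scan_ge t _)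
        rw [pv_scan_append (show (0:Int) ≤ lp + 1 by omega)]
        rw [pv_scan_append (show (0:Int) ≤ scanB_find_next_pair t (lp + 1) + 1 by omega)]
        rw [pv_ext_append hge, pv_ext_append hge2, ← hstep]
      · -- ordinary first step: no padding, then the default chain
        have hlpn : lp + 1 < (t.length : Int) := by
          rcases eq_or_ne lp ((t.length : Int) - 1) with he | he
          · rcases himp he with h' | h' <;> [exact absurd h' hrp; exact absurd h' hrn]
          · omega
        simp only [goA_find_next_pair, if_neg hrp]
        rw [if_neg hrn, hy]
        dsimp only
        rw [if_pos rfl, pv_left FF t (lp + 1) (by omega) hlpn (by omega), ← hstep]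
  · -- negative leftPosition pointing at 'y' (wraparound): the rightPosition argument is
    -- discarded by A's left skip, and the chain never pads nor crosses 0 unsafely
    have hexty : extB_find_next_pair t lp = 'y' := by
      have h := pv_ext_eq_pyGet (t := t) (i := lp) h0 (by omega)
      rw [hy] at h
      exact (Option.some.inj h).symm
    have hstep : scanB_find_next_pair t lp = scanB_find_next_pair t (lp + 1) :=
      pv_scan_step hexty
    have hgt : lp < scanB_find_next_pair t lp := by
      have := pv_scan_ge t (lp + 1)
      omega
    have hsafe : extB_find_next_pair t (-1) ≠ 'y' ∨
        (∀ j, lp ≤ j → j < 0 → extB_find_next_pair t j = 'y') ∨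
        (∃ j k, lp ≤ j ∧ j < k ∧ k < 0 ∧
          extB_find_next_pair t j ≠ 'y' ∧ extB_find_next_pair t k ≠ 'y') := by
      rcases hsafe' with h | h | h
      · rcases pv_getD_ne h with ⟨c, hc, hcy⟩
        have hb := pv_some_bounds hc
        have he := pv_ext_eq_pyGet hb.1 hb.2
        rw [hc] at he
        exact Or.inl (by rw [← Option.some.inj he]; exact hcy)
      · refine Or.inr (Or.inl (fun j hj1 hj2 => ?_))
        by_contra hne
        apply h
        refine List.any_eq_true.2 ⟨j, PySem.List.mem_pyRange_one.2 ⟨hj1, hj2⟩, ?_⟩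
        refine decide_eq_true ?_
        have he := pv_ext_eq_pyGet (t := t) (i := j) (by omega) (by omega)
        rw [he]
        simpa using hne
      · rcases List.any_eq_true.1 h with ⟨j, hjmem, hjp⟩
        have hjr := PySem.List.mem_pyRange_one.1 hjmem
        rcases Bool.and_eq_true_iff.1 hjp with ⟨hj1, hj2⟩
        rcases List.any_eq_true.1 hj2 with ⟨k, hkmem, hkp⟩
        have hkr := PySem.List.mem_pyRange_one.1 hkmem
        rcases pv_getD_ne (of_decide_eq_true hj1) with ⟨cj, hcj, hcjy⟩
        rcases pv_getD_ne (of_decide_eq_true hkp) with ⟨ck, hck, hcky⟩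
        have hej := pv_ext_eq_pyGet (pv_some_bounds hcj).1 (pv_some_bounds hcj).2
        have hek := pv_ext_eq_pyGet (pv_some_bounds hck).1 (pv_some_bounds hck).2
        rw [hcj] at hej
        rw [hck] at hek
        refine Or.inr (Or.inr ⟨j, k, hjr.1, by omega, hkr.2, ?_, ?_⟩)
        · rw [← Option.some.inj hej]; exact hcjy
        · rw [← Option.some.inj hek]; exact hcky
    rw [if_neg (show ¬ (rp ≠ 0 ∧ scanB_find_next_pair t lp = lp) from
      fun hand => absurd hand.2 (by omega))]
    rcases eq_or_ne rp 0 with hrp | hrp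
    · subst hrp
      exact pv_leftNeg (FF + 1) t lp h0 h1 hsafe (by omega)
    · simp only [goA_find_next_pair, if_neg hrp]
      rw [if_neg hrn, hy]
      dsimp only
      rw [if_pos rfl]
      rcases eq_or_lt_of_le (show lp + 1 ≤ 0 by omega) with hz | hneg
      · rw [hstep, hz, pv_left FF t 0 (le_refl 0) (by omega) (by omega)]
      · rw [hstep]
        refine pv_leftNeg FF t (lp + 1) (by omega) hneg ?_ (by omega)
        rcases hsafe with h | h | ⟨j, k, hj, hjk, hk, hjy, hky⟩
        · exact Or.inl h
        · exact Or.inr (Or.inl (fun j hj1 hj2 => h j (by omega) hj2))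
        · refine Or.inr (Or.inr ⟨j, k, ?_, hjk, hk, hjy, hky⟩)
          rcases eq_or_lt_of_le hj with rfl | h'
          · exact absurd hexty hjy
          · omega
  · -- text[leftPosition] != 'y' (leftPosition may be negative: Python wraparound)
    rcases pv_getD_ne hly with ⟨cl, hcl, hcly⟩
    have hextl : extB_find_next_pair t lp = cl := by
      have h := pv_ext_eq_pyGet (t := t) (i := lp) h0 h1
      rw [hcl] at h
      exact (Option.some.inj h).symm
    have hsl : scanB_find_next_pair t lp = lp :=
      pv_scan_stop (by rw [hextl]; exact hcly)
    rcases hRcase with ⟨hp0, hp1, hp2⟩ | ⟨hn0, hn1, hany⟩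
    · -- right cursor starts at a nonnegative position ≤ len
      rcases eq_or_ne rp 0 with hrp | hrp
      · -- default right cursor leftPosition + 1
        subst hrp
        rw [if_neg (show ¬ ((0:Int) ≠ 0 ∧ scanB_find_next_pair t lp = lp) from
          fun hand => absurd rfl hand.1)]
        rcases lt_or_ge lp 0 |>.symm with hlp | hlp
        · rw [pv_left (FF + 1) t lp hlp h1 (by omega)]
        · -- leftPosition = -1 is the only negative start with a nonnegative right cursor
          have hlp1 : lp = -1 := by omega
          subst hlp1
          have hn1 : (1:Int) ≤ (t.length : Int) := by omega
          rcases hp2 with h' | hany'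
          · omega
          · have hscan0 : scanB_find_next_pair t 0 < (t.length : Int) := by
              refine pv_scan_lt (pv_any_ex ?_)
              simpa using hany'
            rcases pv_pyGet_some (t := t) (i := 0) (by omega) (by omega) with ⟨c0, hc0⟩
            have hext0 : extB_find_next_pair t 0 = c0 := by
              have h := pv_ext_eq_pyGet (t := t) (i := 0) (by omega) (by omega)
              rw [hc0] at h
              exact (Option.some.inj h).symm
            simp only [goA_find_next_pair, if_true]
            rw [if_neg (show ¬ (-1 + 1 : Int) = (t.length : Int) by omega), hcl]
            dsimp only
            rw [if_neg hcly]
            norm_num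
            rw [hc0]
            dsimp only
            rw [hsl]
            norm_num
            by_cases hc0y : c0 = 'y'
            · rw [if_pos hc0y]
              have hstep0 : scanB_find_next_pair t 0 = scanB_find_next_pair t 1 := by
                have : extB_find_next_pair t 0 = 'y' := by rw [hext0]; exact hc0y
                simpa using pv_scan_step this
              rw [pv_right FF t (-1) 1 cl h0 h1 hcl hcly
                (Or.inl ⟨le_refl _, by omega, Or.inr (by rw [← hstep0]; exact hscan0)⟩)
                (by omega), hextl, hstep0]
            · rw [if_neg hc0y]
              have : scanB_find_next_pair t 0 = 0 :=
                pv_scan_stop (by rw [hext0]; exact hc0y)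
              rw [this, hext0, hextl]
      · -- explicit nonnegative right cursor: rightPosition itself
        rw [if_pos ⟨hrp, hsl⟩]
        simp only [if_neg hrp] at hp0 hp1 hp2
        have hside : 0 ≤ lp ∨ scanB_find_next_pair t rp < (t.length : Int) := by
          rcases hp2 with h' | hany'
          · exact Or.inl h'
          · exact Or.inr (pv_scan_lt (pv_any_ex hany'))
        rw [pv_right (FF + 1) t lp rp cl h0 h1 hcl hcly
          (Or.inl ⟨by omega, hp1, hside⟩) (by omega), hsl, hextl]
    · -- right cursor starts negative and the scan stops before position 0
      have hscan : scanB_find_next_pair t (if rp = 0 then lp + 1 else rp) < 0 :=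
        pv_scan_lt (pv_any_ex hany)
      rcases eq_or_ne rp 0 with hrp | hrp
      · subst hrp
        rw [if_neg (show ¬ ((0:Int) ≠ 0 ∧ scanB_find_next_pair t lp = lp) from
          fun hand => absurd rfl hand.1)]
        rw [pv_goA_default FF t lp (by omega), pv_right (FF + 1) t lp (lp + 1) cl h0 h1 hcl hcly
          (Or.inr ⟨by omega, by omega, hscan⟩) (by omega), hsl, hextl]
      · rw [if_pos ⟨hrp, hsl⟩]
        simp only [if_neg hrp] at hn0 hn1 hscan
        rw [pv_right (FF + 1) t lp rp cl h0 h1 hcl hcly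
          (Or.inr ⟨hn0, hn1, hscan⟩) (by omega), hsl, hextl]
  · -- leftPosition = rightPosition = len(text): the pad is read on both sides
    subst hlp
    subst hrp
    have hz : PySem.List.pyGet? (t ++ ['z']) (t.length : Int) = some 'z' := by
      exact_mod_cast PySem.List.pyGet?_append_length t [] 'z'
    have hsn : scanB_find_next_pair t (t.length : Int) = (t.length : Int) :=
      pv_scan_stop (by rw [pv_ext_ge t (le_refl _)]; decide)
    simp only [goA_find_next_pair]
    rw [if_neg (show ¬ ((t.length : Int) = 0) by omega), if_pos rfl, hz]
    dsimp only
    rw [if_neg (by decide : ¬ ('z' = 'y')), if_neg (by decide : ¬ ('z' = 'y'))]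
    rw [if_pos ⟨by omega, hsn⟩, hsn, pv_ext_ge t (le_refl _)]
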